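-- pv_equiv track=rewrite | github.com/ADEEL-HUB-ART/Python-Test-Questions | final test program.py | longest_consecutive_strings
-- ===== SOURCE A (Python) =====
-- def longest_consecutive_strings(strarr,k):
--     if k > len(strarr):
--         return ""
--
--     longest_str = ""
--     temp_str = ""
--     for i in range(len(strarr) - k +1) :
--         temp_str = ''.join(strarr[i:i+k])
--         if len (temp_str) > len(longest_str):
--             longest_str = temp_str
--     return longest_str
-- ===== SOURCE B (Python) =====
-- def longest_consecutive_strings(strarr, k):
--     n = len(strarr)
--     if k < 0 or k > n:
--         return ""
--     # prefix sums of string lengths: prefix[j] = len of concatenation of strarr[:j]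
--     prefix = [0]
--     t = 0
--     for s in strarr:
--         t += len(s)
--         prefix.append(t)
--     best_total = -1
--     best_i = 0
--     for i in range(n - k + 1):
--         total = prefix[i + k] - prefix[i]
--         if total > best_total:
--             best_total = total
--             best_i = i
--     return ''.join(strarr[best_i:best_i + k])
-- ===== Notes on version B (the rewrite author's own statement) =====
-- stated objective: faster
-- what changed: Instead of joining every k-window and comparing joined strings (O(n*k) character work), B builds a prefix-sum array of string lengths once, scans window totals in O(1) each to find the first maximal window, and joins only once at the end.
-- outside the precondition, e.g. on longest_consecutive_strings(['a', 'b'], -1): A returns 'a', B returns ''; on longest_consecutive_strings(['aa', 'b', 'cc'], -2): A returns 'aa', B returns ''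
import Mathlib
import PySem

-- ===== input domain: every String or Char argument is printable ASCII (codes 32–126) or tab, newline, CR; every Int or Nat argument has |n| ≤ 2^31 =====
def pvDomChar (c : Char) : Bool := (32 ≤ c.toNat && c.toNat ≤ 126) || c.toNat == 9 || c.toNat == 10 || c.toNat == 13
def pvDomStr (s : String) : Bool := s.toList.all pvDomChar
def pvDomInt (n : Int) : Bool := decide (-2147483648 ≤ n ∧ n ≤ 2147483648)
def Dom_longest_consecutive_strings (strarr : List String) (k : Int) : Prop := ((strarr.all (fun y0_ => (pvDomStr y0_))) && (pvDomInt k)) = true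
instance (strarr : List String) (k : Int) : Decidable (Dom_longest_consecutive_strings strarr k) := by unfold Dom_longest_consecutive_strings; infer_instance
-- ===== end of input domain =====

-- B replaces the per-window join-and-compare (O(n*k) character work) by a prefix-sum scan that
-- finds the first maximal window in O(1) per window and joins once; equivalence proved on k ≥ 0.

-- ===== PORT A =====
def longest_consecutive_strings (strarr : List String) (k : Int) : String :=
  if k > (strarr.length : Int) then ""
  else
    (PySem.List.pyRange 0 ((strarr.length : Int) - k + 1) 1).foldl
      (fun longest_str i =>
        let temp_str := PySem.Str.join "" (PySem.List.slice strarr (some i) (some (i + k)))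
        if PySem.Str.len temp_str > PySem.Str.len longest_str then temp_str else longest_str)
      ""

-- ===== PORT B =====
def longest_consecutive_strings_alt (strarr : List String) (k : Int) : String :=
  let n : Int := strarr.length
  if k < 0 || k > n then ""
  else
    -- prefix sums of string lengths: prefix[j] = total length of strarr[:j]
    let pt := strarr.foldl
      (fun (pt : List Int × Int) s => (pt.1 ++ [pt.2 + PySem.Str.len s], pt.2 + PySem.Str.len s))
      ([0], 0)
    let pre := pt.1
    let bb := (PySem.List.pyRange 0 (n - k + 1) 1).foldl
      (fun (bb : Int × Int) i =>
        -- both indices are always in range here, so the pyGetD default 0 is never used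
        let total := PySem.List.pyGetD pre (i + k) 0 - PySem.List.pyGetD pre i 0
        if total > bb.1 then (total, i) else bb)
      (-1, 0)
    PySem.Str.join "" (PySem.List.slice strarr (some bb.2) (some (bb.2 + k)))

-- ===== PRECONDITION & SPEC =====
-- Pre_ excludes negative k with -k < len(strarr), outside the task's natural domain (k is a window
-- count), where A's results are artefacts of Python's negative slice-stop wraparound; B returns "" there.
def Pre_longest_consecutive_strings (strarr : List String) (k : Int) : Prop :=
  0 ≤ k ∨ (strarr.length : Int) + k ≤ 0
instance (strarr : List String) (k : Int) : Decidable (Pre_longest_consecutive_strings strarr k) := by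
  unfold Pre_longest_consecutive_strings; infer_instance

def pvWitness_longest_consecutive_strings : List String × Int := (["ab", "c", "dd"], 2)

def Spec_longest_consecutive_strings (strarr : List String) (k : Int) (out : String) : Prop := out = longest_consecutive_strings_alt strarr k
instance (strarr : List String) (k : Int) (out : String) : Decidable (Spec_longest_consecutive_strings strarr k out) := by unfold Spec_longest_consecutive_strings; infer_instance

-- ===== CLAIM (what is proved, stated in full; the proofs are below) =====
def Claim_equal_longest_consecutive_strings : Prop := ∀ (strarr : List String) (k : Int), Dom_longest_consecutive_strings strarr k → Pre_longest_consecutive_strings strarr k → Spec_longest_consecutive_strings strarr k (longest_consecutive_strings strarr k)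

-- ===== LEMMAS AND PROOFS =====

-- window string and the two loop bodies, as proof-side names
def pvW (L : List String) (k i : Int) : String :=
  PySem.Str.join "" (PySem.List.slice L (some i) (some (i + k)))

def pvStepA (L : List String) (k : Int) (longest_str : String) (i : Int) : String :=
  let temp_str := PySem.Str.join "" (PySem.List.slice L (some i) (some (i + k)))
  if PySem.Str.len temp_str > PySem.Str.len longest_str then temp_str else longest_str

def pvStepB (L : List String) (k : Int) (bb : Int × Int) (i : Int) : Int × Int :=
  if PySem.Str.len (pvW L k i) > bb.1 then (PySem.Str.len (pvW L k i), i) else bb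

-- prefix sum of lengths, as an Int
def pvS (L : List String) (j : Nat) : Int := ((L.take j).map PySem.Str.len).sum

lemma pvS_zero (L : List String) : pvS L 0 = 0 := by simp [pvS]

lemma pvS_cons_succ (s : String) (tl : List String) (j : Nat) :
    pvS (s :: tl) (j + 1) = PySem.Str.len s + pvS tl j := by
  simp [pvS]

lemma pvPrefix_fold (L : List String) (p0 : List Int) (t0 : Int) :
    L.foldl (fun (pt : List Int × Int) s => (pt.1 ++ [pt.2 + PySem.Str.len s], pt.2 + PySem.Str.len s)) (p0, t0)
      = (p0 ++ (List.range L.length).map (fun j => t0 + pvS L (j + 1)), t0 + pvS L L.length) := by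
  induction L generalizing p0 t0 with
  | nil => simp [pvS]
  | cons s tl ih =>
      simp only [List.foldl_cons]
      rw [ih]
      simp only [Prod.mk.injEq]
      constructor
      · rw [List.length_cons, List.range_succ_eq_map]
        simp [List.map_map, Function.comp, pvS_cons_succ, pvS_zero, add_assoc]
      · rw [List.length_cons, pvS_cons_succ]; ring

lemma pvPrefix_get (L : List String) (j : Nat) (hj : j ≤ L.length) :
    PySem.List.pyGetD ([0] ++ (List.range L.length).map (fun j => 0 + pvS L (j + 1))) (j : Int) 0
      = pvS L j := by
  rw [PySem.List.pyGetD_of_nonneg _ _ (by positivity)]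
  simp only [Int.toNat_natCast]
  cases j with
  | zero => simp [pvS]
  | succ j' =>
      have hj' : j' < L.length := by omega
      simp [List.getD, hj']

lemma pvCharsJoinNil_len (css : List (List Char)) :
    (PySem.Chars.join [] css).length = (css.map List.length).sum := by
  induction css with
  | nil => simp [PySem.Chars.join, List.intercalate]
  | cons c tl ih =>
      cases tl with
      | nil => simp [PySem.Chars.join, List.intercalate]
      | cons d tl' =>
          rw [PySem.Chars.join_cons_cons]
          simp only [List.map_cons, List.sum_cons] at ih ⊢
          simp [ih]

lemma pvJoin_len (parts : List String) :
    PySem.Str.len (PySem.Str.join "" parts) = (parts.map PySem.Str.len).sum := by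
  rw [PySem.Str.len_eq, PySem.Str.toList_join]
  have he : ("" : String).toList = [] := rfl
  rw [he, pvCharsJoinNil_len]
  simp only [List.map_map]
  rw [Nat.cast_list_sum, List.map_map]
  rfl

lemma pvW_len (L : List String) (k i : Int) (hk : 0 ≤ k) (hi : 0 ≤ i) :
    PySem.Str.len (pvW L k i) = pvS L (i + k).toNat - pvS L i.toNat := by
  rw [pvW, pvJoin_len, PySem.List.slice_toNat _ hi (by omega)]
  have hsplit : pvS L (i + k).toNat = pvS L i.toNat
      + (((L.drop i.toNat).take ((i + k).toNat - i.toNat)).map PySem.Str.len).sum := by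
    have : (i + k).toNat = i.toNat + ((i + k).toNat - i.toNat) := by omega
    rw [pvS, pvS, this, List.take_add]
    simp
  omega

lemma pvFold_rel (L : List String) (k : Int) (r : List Int) (longest : String) (b bi : Int)
    (h1 : b = PySem.Str.len longest) (h2 : longest = pvW L k bi) :
    r.foldl (pvStepA L k) longest = pvW L k (r.foldl (pvStepB L k) (b, bi)).2
      ∧ (r.foldl (pvStepB L k) (b, bi)).1 = PySem.Str.len (r.foldl (pvStepA L k) longest) := by
  induction r generalizing longest b bi with
  | nil => simp only [List.foldl_nil]; exact ⟨h2, h1⟩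
  | cons i rest ih =>
      simp only [List.foldl_cons]
      by_cases hc : PySem.Str.len (pvW L k i) > b
      · have hc' : PySem.Str.len (PySem.Str.join "" (PySem.List.slice L (some i) (some (i + k)))) > PySem.Str.len longest := by
          rw [h1] at hc; exact hc
        have hA : pvStepA L k longest i = pvW L k i := by
          simp only [pvStepA, pvW]
          rw [if_pos hc']
        have hB : pvStepB L k (b, bi) i = (PySem.Str.len (pvW L k i), i) := by
          simp only [pvStepB]; rw [if_pos hc]
        rw [hA, hB]
        exact ih _ _ _ rfl rfl
      · have hc' : ¬ PySem.Str.len (PySem.Str.join "" (PySem.List.slice L (some i) (some (i + k)))) > PySem.Str.len longest := by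
          rw [h1] at hc; exact hc
        have hA : pvStepA L k longest i = longest := by
          simp only [pvStepA]
          rw [if_neg hc']
        have hB : pvStepB L k (b, bi) i = (b, bi) := by
          simp only [pvStepB]; rw [if_neg hc]
        rw [hA, hB]
        exact ih _ _ _ h1 h2

lemma pvLen_nonneg (s : String) : 0 ≤ PySem.Str.len s := by
  rw [PySem.Str.len_eq]; positivity

lemma pvLen_zero_eq_empty (s : String) (h : PySem.Str.len s = 0) : s = "" := by
  rw [PySem.Str.len_eq] at h
  have : s.toList = [] := by
    have := Int.natCast_inj.mp (h.trans (by norm_num : (0 : Int) = ((0:Nat) : Int)))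
    simpa [List.length_eq_zero_iff] using this
  rw [← String.toList_inj] at *
  simpa using this

-- ===== VERDICT (by name: the statement is the Claim_ definition above) =====
theorem longest_consecutive_strings_spec : Claim_equal_longest_consecutive_strings := by
  intro strarr k _ hk
  unfold Spec_longest_consecutive_strings
  unfold longest_consecutive_strings longest_consecutive_strings_alt
  simp only []
  by_cases hkneg : k < 0
  · -- then Pre_ forces len + k ≤ 0: every slice is empty, so A's fold stays ""; B's guard gives ""
    have hnk : (strarr.length : Int) + k ≤ 0 := by
      rcases hk with h | h
      · omega
      · exact h
    rw [if_neg (by omega), if_pos (by simp [hkneg])]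
    have hempty : ∀ i : Int, PySem.List.slice strarr (some i) (some (i + k)) = [] := by
      intro i
      rw [← List.length_eq_zero_iff, PySem.List.length_slice]
      have hmono : PySem.List.clampIdx strarr.length (i + k) ≤ PySem.List.clampIdx strarr.length i := by
        simp only [PySem.List.clampIdx]
        split_ifs <;> omega
      omega
    have hjoin : PySem.Str.join "" ([] : List String) = "" := by
      rw [← String.toList_inj, PySem.Str.toList_join]
      simp [PySem.Chars.join, List.intercalate]
    have hfold : ∀ r : List Int,
        r.foldl (fun longest_str i =>
          let temp_str := PySem.Str.join "" (PySem.List.slice strarr (some i) (some (i + k)))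
          if PySem.Str.len temp_str > PySem.Str.len longest_str then temp_str else longest_str) "" = "" := by
      intro r
      induction r with
      | nil => rfl
      | cons i rest ih =>
          simp only [List.foldl_cons, hempty i, hjoin, gt_iff_lt, lt_irrefl]
          simpa using ih
    exact hfold _
  · have hk' : (0 : Int) ≤ k := by omega
    by_cases hbig : k > (strarr.length : Int)
    · rw [if_pos hbig, if_pos (by simp [hbig])]
    · rw [if_neg hbig, if_neg (by simp; omega)]
      rw [gt_iff_lt, not_lt] at hbig
      rw [pvPrefix_fold]
      -- rewrite B's inner fold body into pvStepB via in-range index facts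
      have hcongr : ∀ (bb : Int × Int), ∀ i ∈ PySem.List.pyRange 0 ((strarr.length : Int) - k + 1) 1,
          (fun (bb : Int × Int) i =>
            let total := PySem.List.pyGetD ([0] ++ (List.range strarr.length).map (fun j => 0 + pvS strarr (j + 1))) (i + k) 0
              - PySem.List.pyGetD ([0] ++ (List.range strarr.length).map (fun j => 0 + pvS strarr (j + 1))) i 0
            if total > bb.1 then (total, i) else bb) bb i
          = pvStepB strarr k bb i := by
        intro bb i hi
        rw [PySem.List.mem_pyRange_one] at hi
        obtain ⟨hi0, hilt⟩ := hi
        have h1 : PySem.List.pyGetD ([0] ++ (List.range strarr.length).map (fun j => 0 + pvS strarr (j + 1))) (i + k) 0 = pvS strarr (i + k).toNat := by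
          have hh : ((i + k).toNat : Int) = i + k := by omega
          rw [← hh]; exact pvPrefix_get strarr (i + k).toNat (by omega)
        have h2 : PySem.List.pyGetD ([0] ++ (List.range strarr.length).map (fun j => 0 + pvS strarr (j + 1))) i 0 = pvS strarr i.toNat := by
          have hh : ((i).toNat : Int) = i := by omega
          rw [← hh]; exact pvPrefix_get strarr i.toNat (by omega)
        simp only [h1, h2, pvStepB]
        rw [pvW_len strarr k i hk' hi0]
      rw [PySem.List.foldl_congr_mem _ _ _ _ hcongr]
      -- the range is nonempty: split off i = 0
      have hpos : (0 : Int) < (strarr.length : Int) - k + 1 := by omega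
      rw [PySem.List.pyRange_one_cons hpos]
      have eA : (fun (longest_str : String) (i : Int) =>
          if PySem.Str.len (PySem.Str.join "" (PySem.List.slice strarr (some i) (some (i + k)))) > PySem.Str.len longest_str
          then PySem.Str.join "" (PySem.List.slice strarr (some i) (some (i + k))) else longest_str)
          = pvStepA strarr k := rfl
      rw [eA]
      simp only [List.foldl_cons]
      -- first iteration on both sides
      have hB0 : pvStepB strarr k (-1, 0) 0 = (PySem.Str.len (pvW strarr k 0), 0) := by
        simp only [pvStepB]
        rw [if_pos (by have := pvLen_nonneg (pvW strarr k 0); omega)]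
      have hA0 : pvStepA strarr k "" 0 = pvW strarr k 0 := by
        simp only [pvStepA, pvW]
        by_cases h0 : PySem.Str.len (PySem.Str.join "" (PySem.List.slice strarr (some 0) (some (0 + k)))) > PySem.Str.len ""
        · rw [if_pos h0]
        · rw [if_neg h0]
          have hz : PySem.Str.len (PySem.Str.join "" (PySem.List.slice strarr (some 0) (some (0 + k)))) = 0 := by
            have hnn := pvLen_nonneg (PySem.Str.join "" (PySem.List.slice strarr (some 0) (some (0 + k))))
            have : PySem.Str.len "" = 0 := by rw [PySem.Str.len_eq]; simp
            omega
          exact (pvLen_zero_eq_empty _ hz).symm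
      rw [hA0, hB0]
      exact (pvFold_rel strarr k _ _ _ _ rfl rfl).1
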